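-- pv_equiv track=rewrite | github.com/Jordine/oracle-obfuscation | scripts/oracle_system_prompt_experiment.py | find_key_token_indices
-- ===== SOURCE A (Python) =====
-- def find_key_token_indices(tokens, key_words):
--     """Find indices of key content words in the token list."""
--     found = {}
--     for kw in key_words:
--         for i, tok in enumerate(tokens):
--             if tok == kw and kw not in found:
--                 found[kw] = i
--     # Also find second occurrence of repeated words (e.g., "mom" appears twice)
--     for kw in key_words:
--         count = 0
--         for i, tok in enumerate(tokens):
--             if tok == kw:
--                 count += 1
--                 if count == 1 and kw not in found:
--                     found[kw] = i
--                 elif count == 2: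
--                     found[kw + " (2nd)"] = i
--     return found
-- ===== SOURCE B (Python) =====
-- def find_key_token_indices(tokens, key_words):
--     """Find indices of key content words in the token list."""
--     # One pass over tokens: token -> its first (at most two) positions.
--     pos = {}
--     for i, tok in enumerate(tokens):
--         p = pos.get(tok, [])
--         if len(p) < 2:
--             pos[tok] = p + [i]
--     found = {}
--     for kw in key_words:
--         p = pos.get(kw, [])
--         if p and kw not in found:
--             found[kw] = p[0]
--     for kw in key_words:
--         p = pos.get(kw, [])
--         if len(p) > 1:
--             found[kw + " (2nd)"] = p[1]
--     return found
-- ===== Notes on version B (the rewrite author's own statement) =====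
-- stated objective: faster
-- what changed: Replaces A's two K-fold scans of the token list with a single pass building a token->positions index (first two occurrences), then O(1) dict lookups per keyword.
import Mathlib
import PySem

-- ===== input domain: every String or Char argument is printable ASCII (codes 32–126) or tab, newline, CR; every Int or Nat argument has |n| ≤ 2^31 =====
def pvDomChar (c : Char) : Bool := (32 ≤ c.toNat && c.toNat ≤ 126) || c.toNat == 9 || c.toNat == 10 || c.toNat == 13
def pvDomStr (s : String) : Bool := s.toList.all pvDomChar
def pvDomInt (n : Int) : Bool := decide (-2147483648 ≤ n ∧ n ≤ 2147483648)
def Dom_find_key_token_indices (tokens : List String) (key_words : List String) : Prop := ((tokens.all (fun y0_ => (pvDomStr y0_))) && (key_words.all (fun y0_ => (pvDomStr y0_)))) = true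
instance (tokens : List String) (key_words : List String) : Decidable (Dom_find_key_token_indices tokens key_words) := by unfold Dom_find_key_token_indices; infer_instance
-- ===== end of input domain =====

-- B replaces A's per-keyword rescans of tokens with one indexing pass over tokens plus dict lookups (faster, asymptotic).

-- ===== PORT A =====
-- first loop body of A: for i, tok in enumerate(tokens): if tok == kw and kw not in found: found[kw] = i
def pvStepA1 (tokens : List String) (f : PySem.Dict String Int) (kw : String) : PySem.Dict String Int :=
  (PySem.List.enumerate tokens).foldl
    (fun f p => if p.2 == kw && !(f.contains kw) then f.insert kw p.1 else f) f

-- second loop body of A, with the running `count`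
def pvStepA2 (tokens : List String) (f : PySem.Dict String Int) (kw : String) : PySem.Dict String Int :=
  ((PySem.List.enumerate tokens).foldl
    (fun (st : PySem.Dict String Int × Int) p =>
      if p.2 == kw then
        let count := st.2 + 1
        let fnd := if count == 1 && !(st.1.contains kw) then st.1.insert kw p.1
                   else if count == 2 then st.1.insert (kw ++ " (2nd)") p.1
                   else st.1
        (fnd, count)
      else st) (f, 0)).1

def find_key_token_indices (tokens : List String) (key_words : List String) : List (String × Int) :=
  let found := key_words.foldl (pvStepA1 tokens) PySem.Dict.empty
  let found := key_words.foldl (pvStepA2 tokens) found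
  found.items

-- ===== PORT B =====
-- indexing pass: pos[tok] keeps the first (at most two) positions of tok
def pvStepPos (d : PySem.Dict String (List Int)) (p : Int × String) : PySem.Dict String (List Int) :=
  let l := d.getD p.2 []
  if l.length < 2 then d.insert p.2 (l ++ [p.1]) else d

def pvStepB1 (pos : PySem.Dict String (List Int)) (f : PySem.Dict String Int) (kw : String) : PySem.Dict String Int :=
  match pos.getD kw [] with
  | i :: _ => if !(f.contains kw) then f.insert kw i else f
  | [] => f

def pvStepB2 (pos : PySem.Dict String (List Int)) (f : PySem.Dict String Int) (kw : String) : PySem.Dict String Int :=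
  match pos.getD kw [] with
  | _ :: j :: _ => f.insert (kw ++ " (2nd)") j
  | _ => f

def find_key_token_indices_alt (tokens : List String) (key_words : List String) : List (String × Int) :=
  let pos := (PySem.List.enumerate tokens).foldl pvStepPos PySem.Dict.empty
  let found := key_words.foldl (pvStepB1 pos) PySem.Dict.empty
  let found := key_words.foldl (pvStepB2 pos) found
  found.items

-- ===== PRECONDITION & SPEC =====
def Spec_find_key_token_indices (tokens : List String) (key_words : List String) (out : List (String × Int)) : Prop := out = find_key_token_indices_alt tokens key_words
instance (tokens : List String) (key_words : List String) (out : List (String × Int)) : Decidable (Spec_find_key_token_indices tokens key_words out) := by unfold Spec_find_key_token_indices; infer_instance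

-- ===== CLAIM (what is proved, stated in full; the proofs are below) =====
def Claim_equal_find_key_token_indices : Prop := ∀ (tokens : List String) (key_words : List String), Dom_find_key_token_indices tokens key_words → Spec_find_key_token_indices tokens key_words (find_key_token_indices tokens key_words)

-- ===== LEMMAS AND PROOFS =====

-- positions of kw in an enumerated fragment
def pvOccl (l : List (Int × String)) (kw : String) : List Int :=
  (l.filter (fun p => p.2 == kw)).map (·.1)

theorem pvOccl_nil (kw : String) : pvOccl [] kw = [] := rfl

theorem pvOccl_cons (p : Int × String) (l : List (Int × String)) (kw : String) :
    pvOccl (p :: l) kw = if p.2 == kw then p.1 :: pvOccl l kw else pvOccl l kw := by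
  cases h : (p.2 == kw) <;> simp [pvOccl, List.filter_cons, h]

-- the indexing fold keeps, per key, its old value extended by up to (2 - old length) new positions
theorem pv_pos_getD (l : List (Int × String)) :
    ∀ (d : PySem.Dict String (List Int)) (kw : String),
      (l.foldl pvStepPos d).getD kw [] =
        d.getD kw [] ++ (pvOccl l kw).take (2 - (d.getD kw []).length) := by
  induction l with
  | nil => intro d kw; simp [pvOccl]
  | cons p l ih =>
    intro d kw
    rw [List.foldl_cons, ih, pvOccl_cons]
    show (pvStepPos d p).getD kw [] ++ _ = _
    unfold pvStepPos
    by_cases ht : p.2 = kw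
    · subst ht
      simp only [beq_self_eq_true, if_true]
      split
      · rename_i hlt
        rw [PySem.Dict.getD_insert_self, List.length_append]
        have h2 : 2 - (d.getD p.2 []).length = ((2 - ((d.getD p.2 []).length + 1)) + 1) := by omega
        rw [h2, List.take_succ_cons, List.append_assoc]
        simp
      · rename_i hge
        have h0 : 2 - (d.getD p.2 []).length = 0 := by omega
        rw [h0]
        simp
    · have hbe : (p.2 == kw) = false := by simp [ht]
      rw [hbe]
      simp only [Bool.false_eq_true, if_false]
      split
      · rw [PySem.Dict.getD_insert, if_neg (fun h => ht h.symm)]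
      · rfl

theorem pv_pos_eq (tokens : List String) (kw : String) :
    ((PySem.List.enumerate tokens).foldl pvStepPos PySem.Dict.empty).getD kw [] =
      (pvOccl (PySem.List.enumerate tokens) kw).take 2 := by
  rw [pv_pos_getD]
  simp [PySem.Dict.getD_empty]

-- A's first inner loop, characterised
theorem pv_loop1 (kw : String) : ∀ (l : List (Int × String)) (f : PySem.Dict String Int),
    (l.foldl (fun f p => if p.2 == kw && !(f.contains kw) then f.insert kw p.1 else f) f) =
      if f.contains kw then f
      else match (pvOccl l kw).head? with
           | some i => f.insert kw i
           | none => f := by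
  intro l
  induction l with
  | nil => intro f; simp [pvOccl]
  | cons p l ih =>
    intro f
    rw [List.foldl_cons, pvOccl_cons]
    by_cases hc : f.contains kw = true
    · simp only [hc, Bool.not_true, Bool.and_false, Bool.false_eq_true, if_false]
      rw [ih]
      simp [hc]
    · have hc' : f.contains kw = false := by simpa using hc
      by_cases ht : (p.2 == kw) = true
      · simp only [ht, hc', Bool.not_false, Bool.and_true, if_true, Bool.true_and]
        rw [ih]
        simp [PySem.Dict.contains_insert_self, hc']
      · have ht' : (p.2 == kw) = false := by simpa using ht
        simp only [ht', Bool.false_and, if_false, Bool.false_eq_true]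
        rw [ih, hc']

-- A's per-keyword pass 1 equals B's
theorem pv_step1_eq (tokens : List String) (f : PySem.Dict String Int) (kw : String) :
    pvStepA1 tokens f kw =
      pvStepB1 ((PySem.List.enumerate tokens).foldl pvStepPos PySem.Dict.empty) f kw := by
  unfold pvStepA1 pvStepB1
  rw [pv_loop1, pv_pos_eq]
  cases h : pvOccl (PySem.List.enumerate tokens) kw with
  | nil => simp
  | cons i r =>
    simp only [List.take_succ_cons, List.head?_cons]
    by_cases hc : f.contains kw = true <;> simp [hc]

-- A's second inner loop, characterised (count starts at c ≥ 0)
theorem pv_loop2 (kw : String) : ∀ (l : List (Int × String)) (f : PySem.Dict String Int) (c : Int), 0 ≤ c →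
    ((l.foldl (fun (st : PySem.Dict String Int × Int) p =>
        if p.2 == kw then
          let count := st.2 + 1
          let fnd := if count == 1 && !(st.1.contains kw) then st.1.insert kw p.1
                     else if count == 2 then st.1.insert (kw ++ " (2nd)") p.1
                     else st.1
          (fnd, count)
        else st) (f, c)).1) =
      if c = 0 then
        (match pvOccl l kw with
         | [] => f
         | [i] => if f.contains kw then f else f.insert kw i
         | i :: j :: _ => (if f.contains kw then f else f.insert kw i).insert (kw ++ " (2nd)") j)
      else if c = 1 then
        (match pvOccl l kw with
         | [] => f
         | j :: _ => f.insert (kw ++ " (2nd)") j)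
      else f := by
  intro l
  induction l with
  | nil =>
    intro f c _
    simp only [List.foldl_nil, pvOccl_nil]
    split
    · rfl
    · split <;> rfl
  | cons p l ih =>
    intro f c hc
    rw [List.foldl_cons, pvOccl_cons]
    by_cases ht : (p.2 == kw) = true
    · simp only [ht, if_true]
      rcases eq_or_lt_of_le hc with h0 | hpos
      · -- c = 0, count = 1
        have hc0 : c = 0 := h0.symm
        subst hc0
        have h1 : ((0 : Int) + 1 == 1) = true := by decide
        have h2 : ((0 : Int) + 1 == 2) = false := by decide
        simp only [h1, h2, Bool.true_and, Bool.false_eq_true, if_false]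
        rw [ih _ _ (by omega)]
        simp only [show (0:Int) + 1 ≠ 0 by omega, if_false, if_pos rfl, if_pos rfl]
        cases hocc : pvOccl l kw with
        | nil =>
          by_cases hcn : f.contains kw = true <;> simp [hcn]
        | cons j r =>
          by_cases hcn : f.contains kw = true <;> simp [hcn] <;> cases r <;> rfl
      · rcases eq_or_lt_of_le (by omega : (1:Int) ≤ c) with h1 | h2
        · -- c = 1, count = 2
          have hc1 : c = 1 := h1.symm
          subst hc1
          have e1 : ((1 : Int) + 1 == 1) = false := by decide
          have e2 : ((1 : Int) + 1 == 2) = true := by decide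
          simp only [e1, e2, Bool.false_and, Bool.false_eq_true, if_false, if_true]
          rw [ih _ _ (by omega)]
          simp only [show (1:Int) + 1 ≠ 0 by omega, show (1:Int) + 1 ≠ 1 by omega,
            if_false, if_neg (by omega : (1:Int) ≠ 0), if_pos rfl]
        · -- c ≥ 2
          have e1 : ((c : Int) + 1 == 1) = false := by simp; omega
          have e2 : ((c : Int) + 1 == 2) = false := by simp; omega
          simp only [e1, e2, Bool.false_and, Bool.false_eq_true, if_false]
          rw [ih _ _ (by omega)]
          simp only [show c + 1 ≠ 0 by omega, show c + 1 ≠ 1 by omega, if_false,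
            if_neg (by omega : c ≠ 0), if_neg (by omega : c ≠ 1)]
    · have ht' : (p.2 == kw) = false := by simpa using ht
      simp only [ht', Bool.false_eq_true, if_false]
      exact ih f c hc

-- contains is monotone under every step
theorem pv_mono_insert (f : PySem.Dict String Int) (k a : String) (v : Int)
    (h : f.contains k = true) : (f.insert a v).contains k = true := by
  rw [PySem.Dict.contains_insert, h]
  simp

theorem pv_mono_B1 (pos : PySem.Dict String (List Int)) (f : PySem.Dict String Int)
    (kw k : String) (h : f.contains k = true) : (pvStepB1 pos f kw).contains k = true := by
  unfold pvStepB1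
  cases hg : pos.getD kw [] with
  | nil => simp only [hg]; exact h
  | cons i r =>
    simp only [hg]
    split
    · exact pv_mono_insert _ _ _ _ h
    · exact h

theorem pv_mono_foldB1 (pos : PySem.Dict String (List Int)) :
    ∀ (kws : List String) (f : PySem.Dict String Int) (k : String),
      f.contains k = true → (kws.foldl (pvStepB1 pos) f).contains k = true := by
  intro kws
  induction kws with
  | nil => intro f k h; exact h
  | cons kw kws ih => intro f k h; exact ih _ _ (pv_mono_B1 pos f kw k h)

theorem pv_mono_B2 (pos : PySem.Dict String (List Int)) (f : PySem.Dict String Int)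
    (kw k : String) (h : f.contains k = true) : (pvStepB2 pos f kw).contains k = true := by
  unfold pvStepB2
  cases hg : pos.getD kw [] with
  | nil => simp only [hg]; exact h
  | cons i r =>
    cases r with
    | nil => simp only [hg]; exact h
    | cons j r' => simp only [hg]; exact pv_mono_insert _ _ _ _ h

-- after B's first pass, every keyword that occurs is in found
theorem pv_estab (pos : PySem.Dict String (List Int)) :
    ∀ (kws : List String) (f : PySem.Dict String Int) (k : String),
      k ∈ kws → pos.getD k [] ≠ [] →
      (kws.foldl (pvStepB1 pos) f).contains k = true := by
  intro kws
  induction kws with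
  | nil => intro f k h; exact absurd h (by simp)
  | cons kw kws ih =>
    intro f k hmem hne
    rw [List.foldl_cons]
    rcases List.mem_cons.mp hmem with heq | htail
    · subst heq
      apply pv_mono_foldB1
      unfold pvStepB1
      cases hg : pos.getD k [] with
      | nil => exact absurd hg hne
      | cons i r =>
        simp only [hg]
        split
        · exact PySem.Dict.contains_insert_self _ _ _
        · rename_i hnc; simpa using hnc
    · exact ih _ _ htail hne

-- A's per-keyword pass 2 equals B's whenever found already contains every occurring keyword
theorem pv_step2_eq (tokens : List String) (f : PySem.Dict String Int) (kw : String)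
    (pos : PySem.Dict String (List Int))
    (hpos : ∀ k, pos.getD k [] = (pvOccl (PySem.List.enumerate tokens) k).take 2)
    (hin : pvOccl (PySem.List.enumerate tokens) kw ≠ [] → f.contains kw = true) :
    pvStepA2 tokens f kw = pvStepB2 pos f kw := by
  unfold pvStepA2 pvStepB2
  rw [pv_loop2 kw _ f 0 le_rfl]
  simp only [if_pos rfl, hpos]
  cases hocc : pvOccl (PySem.List.enumerate tokens) kw with
  | nil => rfl
  | cons i r =>
    have hcf : f.contains kw = true := hin (by simp [hocc])
    cases r with
    | nil => simp [hcf]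
    | cons j r' => simp [hcf]

-- B's second pass equals A's second pass from a state containing every occurring keyword
theorem pv_fold2_eq (tokens : List String) (pos : PySem.Dict String (List Int))
    (hpos : ∀ k, pos.getD k [] = (pvOccl (PySem.List.enumerate tokens) k).take 2) :
    ∀ (kws : List String) (f : PySem.Dict String Int),
      (∀ k ∈ kws, pvOccl (PySem.List.enumerate tokens) k ≠ [] → f.contains k = true) →
      kws.foldl (pvStepA2 tokens) f = kws.foldl (pvStepB2 pos) f := by
  intro kws
  induction kws with
  | nil => intro f _; rfl
  | cons kw kws ih =>
    intro f hinv
    rw [List.foldl_cons, List.foldl_cons,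
      pv_step2_eq tokens f kw pos hpos (hinv kw (by simp))]
    exact ih _ (fun k hk hne => pv_mono_B2 pos f kw k (hinv k (by simp [hk]) hne))

theorem pv_fold1_eq (tokens : List String) :
    ∀ (kws : List String) (f : PySem.Dict String Int),
      kws.foldl (pvStepA1 tokens) f =
        kws.foldl (pvStepB1 ((PySem.List.enumerate tokens).foldl pvStepPos PySem.Dict.empty)) f := by
  intro kws
  induction kws with
  | nil => intro f; rfl
  | cons kw kws ih =>
    intro f
    rw [List.foldl_cons, List.foldl_cons, pv_step1_eq, ih]

-- ===== VERDICT (by name: the statement is the Claim_ definition above) =====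
theorem find_key_token_indices_spec : Claim_equal_find_key_token_indices := by
  intro tokens key_words _
  show (key_words.foldl (pvStepA2 tokens)
          (key_words.foldl (pvStepA1 tokens) PySem.Dict.empty)).items =
       (key_words.foldl (pvStepB2 ((PySem.List.enumerate tokens).foldl pvStepPos PySem.Dict.empty))
          (key_words.foldl (pvStepB1 ((PySem.List.enumerate tokens).foldl pvStepPos PySem.Dict.empty))
            PySem.Dict.empty)).items
  set pos := (PySem.List.enumerate tokens).foldl pvStepPos PySem.Dict.empty with hposdef
  have hpos : ∀ k, pos.getD k [] = (pvOccl (PySem.List.enumerate tokens) k).take 2 :=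
    fun k => pv_pos_eq tokens k
  rw [pv_fold1_eq tokens key_words PySem.Dict.empty]
  apply congrArg
  apply pv_fold2_eq tokens pos hpos
  intro k hk hne
  apply pv_estab pos key_words _ k hk
  rw [hpos k]
  cases h : pvOccl (PySem.List.enumerate tokens) k with
  | nil => exact absurd h hne
  | cons i r => simp
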